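-- pv_equiv track=rewrite | github.com/parkchanbin54/boj | 프로그래머스/unrated/150369. 택배 배달과 수거하기/택배 배달과 수거하기.py | solution
-- ===== SOURCE A (Python) =====
-- def solution(cap, n, deliveries, pickups):
--     answer = 0
--
--     deli, pick = 0,0
--     deliveries = deliveries[::-1]
--     pickups = pickups[::-1]
--
--     for i in range(n):
--         deli += deliveries[i]
--         pick += pickups[i]
--
--         while deli > 0 or pick > 0:
--             deli -= cap
--             pick -= cap
--             answer += (n-i) * 2
--
--     return answer
-- ===== SOURCE B (Python) =====
-- def solution(cap, n, deliveries, pickups):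
--     # One pass, no list reversal, no inner while: trip count per house by ceiling division.
--     answer = 0
--     deli, pick = 0, 0
--     ld, lp = len(deliveries), len(pickups)
--     for i in range(n):
--         deli += deliveries[ld - 1 - i]
--         pick += pickups[lp - 1 - i]
--         need = deli if deli >= pick else pick
--         if need > 0:
--             trips = -(-need // cap)
--             deli -= trips * cap
--             pick -= trips * cap
--             answer += trips * (n - i) * 2
--     return answer
-- ===== Notes on version B (the rewrite author's own statement) =====
-- stated objective: alternative
-- what changed: Replaced A's inner while-loop (one iteration per truck trip) with a direct ceiling-division trip count per house, and dropped the list reversals in favour of indexing from the far end.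
-- outside the precondition, e.g. on solution(-1, 1, [-1], [-1]): A returns 0, B returns 0
import Mathlib
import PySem

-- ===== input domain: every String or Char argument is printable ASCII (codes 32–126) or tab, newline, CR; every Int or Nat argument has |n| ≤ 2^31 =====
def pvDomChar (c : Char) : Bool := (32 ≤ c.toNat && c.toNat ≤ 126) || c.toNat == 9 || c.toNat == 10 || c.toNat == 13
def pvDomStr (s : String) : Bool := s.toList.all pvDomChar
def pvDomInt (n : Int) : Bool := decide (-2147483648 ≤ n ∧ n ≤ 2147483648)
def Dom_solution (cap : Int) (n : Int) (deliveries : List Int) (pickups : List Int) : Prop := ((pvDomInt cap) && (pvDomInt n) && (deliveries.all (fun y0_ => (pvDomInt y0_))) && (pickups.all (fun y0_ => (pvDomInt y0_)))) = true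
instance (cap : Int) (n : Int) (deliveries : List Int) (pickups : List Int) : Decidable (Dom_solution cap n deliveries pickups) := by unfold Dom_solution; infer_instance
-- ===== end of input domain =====

-- B replaces A's inner while-loop (one iteration per trip) by a direct ceiling-division trip
-- count, and drops the list reversals, indexing from the far end instead (alternative algorithm).

-- ===== PORT A =====
-- the while-loop of A; fuel makes it total: (max deli pick).toNat iterations suffice when cap > 0
-- (each pass lowers both by cap ≥ 1); for cap ≤ 0 the Python loop diverges (outside Pre_).
def solWhile (fuel : Nat) (cap : Int) (deli pick add answer : Int) : Int × Int × Int :=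
  match fuel with
  | 0 => (deli, pick, answer)
  | Nat.succ f =>
    if deli > 0 ∨ pick > 0 then
      solWhile f cap (deli - cap) (pick - cap) add (answer + add)
    else (deli, pick, answer)

def solution (cap : Int) (n : Int) (deliveries : List Int) (pickups : List Int) : Int :=
  let dr := (PySem.List.slice? deliveries none none (-1)).getD []   -- deliveries[::-1]
  let pr := (PySem.List.slice? pickups none none (-1)).getD []      -- pickups[::-1]
  let st := (PySem.List.pyRange 0 n 1).foldl
    (fun (s : Int × Int × Int) (i : Int) =>
      let deli := s.1 + PySem.List.pyGetD dr i 0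
      let pick := s.2.1 + PySem.List.pyGetD pr i 0
      solWhile (max deli pick).toNat cap deli pick ((n - i) * 2) s.2.2)
    (0, 0, 0)
  st.2.2

-- ===== PORT B =====
def solution_alt (cap : Int) (n : Int) (deliveries : List Int) (pickups : List Int) : Int :=
  let ld : Int := deliveries.length
  let lp : Int := pickups.length
  let st := (PySem.List.pyRange 0 n 1).foldl
    (fun (s : Int × Int × Int) (i : Int) =>
      let deli := s.1 + PySem.List.pyGetD deliveries (ld - 1 - i) 0
      let pick := s.2.1 + PySem.List.pyGetD pickups (lp - 1 - i) 0
      let need := if deli ≥ pick then deli else pick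
      if need > 0 then
        let trips := -(PySem.Int.floordiv (-need) cap)
        (deli - trips * cap, pick - trips * cap, s.2.2 + trips * (n - i) * 2)
      else (deli, pick, s.2.2))
    (0, 0, 0)
  st.2.2

-- ===== PRECONDITION & SPEC =====
-- Pre_ excludes inputs where A raises IndexError (n exceeds a list length) or diverges in the
-- inner while-loop (cap ≤ 0 with a positive running load); for cap ≤ 0 with n > 0 it also
-- excludes the all-nonpositive loads on which A happens to return 0 (B returns 0 there too).
def Pre_solution (cap : Int) (n : Int) (deliveries : List Int) (pickups : List Int) : Prop :=
  n ≤ 0 ∨ (0 < cap ∧ n ≤ (deliveries.length : Int) ∧ n ≤ (pickups.length : Int))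
instance (cap : Int) (n : Int) (deliveries : List Int) (pickups : List Int) : Decidable (Pre_solution cap n deliveries pickups) := by unfold Pre_solution; infer_instance

def pvWitness_solution : Int × Int × List Int × List Int := (4, 2, [2, 5], [3, 1])

def Spec_solution (cap : Int) (n : Int) (deliveries : List Int) (pickups : List Int) (out : Int) : Prop := out = solution_alt cap n deliveries pickups
instance (cap : Int) (n : Int) (deliveries : List Int) (pickups : List Int) (out : Int) : Decidable (Spec_solution cap n deliveries pickups out) := by unfold Spec_solution; infer_instance

-- ===== CLAIM (what is proved, stated in full; the proofs are below) =====
def Claim_equal_solution : Prop := ∀ (cap : Int) (n : Int) (deliveries : List Int) (pickups : List Int), Dom_solution cap n deliveries pickups → Pre_solution cap n deliveries pickups → Spec_solution cap n deliveries pickups (solution cap n deliveries pickups)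

-- ===== LEMMAS AND PROOFS =====

-- trip count of A's while-loop, as B computes it
def ceilT (cap m : Int) : Int := if 0 < m then -(PySem.Int.floordiv (-m) cap) else 0

lemma ceilT_bracket (cap m : Int) (hc : 0 < cap) (hm : 0 < m) :
    (ceilT cap m - 1) * cap < m ∧ m ≤ ceilT cap m * cap := by
  have h := (PySem.Int.neg_floordiv_neg_eq_iff_of_pos (a := m) (b := cap)
    (q := -(PySem.Int.floordiv (-m) cap)) hc).mp rfl
  simpa [ceilT, hm] using h

lemma solWhile_closed (cap : Int) (hc : 0 < cap) :
    ∀ (fuel : Nat) (deli pick answer add : Int), max deli pick ≤ (fuel : Int) →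
      solWhile fuel cap deli pick add answer =
        (deli - ceilT cap (max deli pick) * cap,
         pick - ceilT cap (max deli pick) * cap,
         answer + ceilT cap (max deli pick) * add) := by
  intro fuel
  induction fuel with
  | zero =>
    intro deli pick answer add hf
    have hm : max deli pick ≤ 0 := by exact_mod_cast hf
    have ht : ceilT cap (max deli pick) = 0 := by simp [ceilT]; omega
    simp [solWhile, ht]
  | succ f ih =>
    intro deli pick answer add hf
    by_cases hg : deli > 0 ∨ pick > 0
    · have hm : 0 < max deli pick := by omega
      obtain ⟨hb1, hb2⟩ := ceilT_bracket cap (max deli pick) hc hm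
      set t := ceilT cap (max deli pick) with ht
      have ht1 : 1 ≤ t := by nlinarith
      have hmax' : max (deli - cap) (pick - cap) = max deli pick - cap := by omega
      have hrec := ih (deli - cap) (pick - cap) (answer + add) add
        (by rw [hmax']; omega)
      have ht' : ceilT cap (max (deli - cap) (pick - cap)) = t - 1 := by
        rw [hmax']; unfold ceilT
        by_cases hpp : 0 < max deli pick - cap
        · rw [if_pos hpp]
          exact (PySem.Int.neg_floordiv_neg_eq_iff_of_pos hc).mpr
            ⟨by nlinarith, by nlinarith⟩
        · rw [if_neg hpp]
          have h1 : t = 1 := by nlinarith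
          omega
      simp only [solWhile, if_pos hg]
      rw [hrec, ht']
      refine Prod.ext (by ring) (Prod.ext (by ring) ?_)
      simp; ring
    · have hm : max deli pick ≤ 0 := by omega
      have ht : ceilT cap (max deli pick) = 0 := by simp [ceilT]; omega
      simp [solWhile, if_neg hg, ht]

lemma bodies_eq (cap n : Int) (deliveries pickups : List Int)
    (hc : 0 < cap) (hd : n ≤ (deliveries.length : Int)) (hp : n ≤ (pickups.length : Int))
    (s : Int × Int × Int) (i : Int) (hi0 : 0 ≤ i) (hin : i < n) :
    (let deli := s.1 + PySem.List.pyGetD deliveries.reverse i 0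
     let pick := s.2.1 + PySem.List.pyGetD pickups.reverse i 0
     solWhile (max deli pick).toNat cap deli pick ((n - i) * 2) s.2.2)
    =
    (let deli := s.1 + PySem.List.pyGetD deliveries ((deliveries.length : Int) - 1 - i) 0
     let pick := s.2.1 + PySem.List.pyGetD pickups ((pickups.length : Int) - 1 - i) 0
     let need := if deli ≥ pick then deli else pick
     if need > 0 then
       let trips := -(PySem.Int.floordiv (-need) cap)
       (deli - trips * cap, pick - trips * cap, s.2.2 + trips * (n - i) * 2)
     else (deli, pick, s.2.2)) := by
  have hgd : PySem.List.pyGetD deliveries.reverse i 0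
      = PySem.List.pyGetD deliveries ((deliveries.length : Int) - 1 - i) 0 := by
    rw [PySem.List.pyGetD_eq_getElem _ _ hi0 (by simpa using lt_of_lt_of_le hin hd),
        PySem.List.pyGetD_eq_getElem _ _ (by omega) (by omega)]
    rw [List.getElem_reverse]
    congr 1
    omega
  have hgp : PySem.List.pyGetD pickups.reverse i 0
      = PySem.List.pyGetD pickups ((pickups.length : Int) - 1 - i) 0 := by
    rw [PySem.List.pyGetD_eq_getElem _ _ hi0 (by simpa using lt_of_lt_of_le hin hp),
        PySem.List.pyGetD_eq_getElem _ _ (by omega) (by omega)]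
    rw [List.getElem_reverse]
    congr 1
    omega
  simp only [hgd, hgp]
  set deli := s.1 + PySem.List.pyGetD deliveries ((deliveries.length : Int) - 1 - i) 0 with hdeli
  set pick := s.2.1 + PySem.List.pyGetD pickups ((pickups.length : Int) - 1 - i) 0 with hpick
  have hfuel : max deli pick ≤ ((max deli pick).toNat : Int) := by omega
  rw [solWhile_closed cap hc _ deli pick s.2.2 ((n - i) * 2) hfuel]
  have hneed : (if deli ≥ pick then deli else pick) = max deli pick := by
    split_ifs <;> omega
  rw [hneed]
  by_cases hpos : 0 < max deli pick
  · simp only [ceilT, if_pos hpos]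
    refine Prod.ext rfl (Prod.ext rfl ?_)
    simp; ring
  · simp only [ceilT, if_neg hpos]
    simp

-- ===== VERDICT (by name: the statement is the Claim_ definition above) =====
theorem solution_spec : Claim_equal_solution := by
  intro cap n deliveries pickups _hDom hPre
  unfold Spec_solution solution solution_alt
  rcases hPre with hn | ⟨hc, hd, hp⟩
  · rw [PySem.List.pyRange_one_eq_nil hn]; rfl
  · simp only [PySem.List.slice?_none_none_neg_one, Option.getD_some]
    exact congrArg (fun st : Int × Int × Int => st.2.2)
      (PySem.List.foldl_congr_mem _ _ _ _ (fun acc x hx =>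
        bodies_eq cap n deliveries pickups hc hd hp acc x
          ((PySem.List.mem_pyRange_one).mp hx).1 ((PySem.List.mem_pyRange_one).mp hx).2))
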